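-- pv_equiv track=rewrite | github.com/filipp-g/challenges | graph_navigation/5_json_backend.py | get_cheapest_path
-- ===== SOURCE A (Python) =====
-- def get_cheapest_path(paths):
--     """ looks for cheapest path. if multiple match, takes quickest """
--     lowest_val = min([x[1] for x in paths])
--     cheapest = [x[0] for x in paths if x[1] == lowest_val]
--     if len(cheapest) == 0:
--         return False
--     elif len(cheapest) > 1:
--         quickest = min([len(x) for x in cheapest])
--         return [x for x in cheapest if len(x) == quickest][0]
--     else:
--         return cheapest[0]
-- ===== SOURCE B (Python) =====
-- def get_cheapest_path(paths):
--     """ looks for cheapest path. if multiple match, takes quickest """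
--     return min(paths, key=lambda x: (x[1], len(x[0])))[0]
-- ===== Notes on version B (the rewrite author's own statement) =====
-- stated objective: simpler
-- what changed: Replaces the five-stage pipeline (min over costs, filter, min over lengths, filter, index) by a single one-pass lexicographic min keyed by (cost, path length).
import Mathlib
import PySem

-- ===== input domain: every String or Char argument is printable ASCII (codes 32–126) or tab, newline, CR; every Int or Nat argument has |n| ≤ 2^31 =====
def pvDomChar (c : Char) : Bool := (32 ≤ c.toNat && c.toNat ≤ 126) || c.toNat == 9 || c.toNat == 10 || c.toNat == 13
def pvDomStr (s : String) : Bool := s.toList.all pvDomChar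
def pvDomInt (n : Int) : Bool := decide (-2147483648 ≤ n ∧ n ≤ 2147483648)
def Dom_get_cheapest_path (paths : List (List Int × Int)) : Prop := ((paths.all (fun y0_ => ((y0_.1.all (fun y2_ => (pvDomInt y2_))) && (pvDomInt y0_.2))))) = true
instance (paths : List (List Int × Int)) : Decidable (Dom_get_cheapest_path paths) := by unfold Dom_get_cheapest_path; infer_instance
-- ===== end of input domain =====

-- B replaces A's five-stage min/filter/min/filter/index pipeline by a single one-pass
-- lexicographic min keyed by (cost, path length); return values are proved equal on all
-- nonempty inputs (both raise ValueError on []).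


-- ===== PORT A =====
def get_cheapest_path (paths : List (List Int × Int)) : List Int :=
  match PySem.List.min? (paths.map (fun x => x.2)) (fun v => v) with
  | none => []               -- min([]) raises ValueError; excluded by Pre_
  | some lowest_val =>
    let cheapest := (paths.filter (fun x => x.2 == lowest_val)).map (fun x => x.1)
    if cheapest.length = 0 then []        -- Python 'return False' (dead code: cheapest nonempty)
    else if 1 < cheapest.length then
      match PySem.List.min? (cheapest.map (fun x => x.length)) (fun v => v) with
      | none => []           -- min([]) raises; unreachable here
      | some quickest =>
        match (cheapest.filter (fun x => x.length == quickest)).head? with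
        | some r => r        -- [...][0]
        | none => []         -- IndexError; unreachable
    else
      match cheapest.head? with
      | some r => r          -- cheapest[0]
      | none => []           -- IndexError; unreachable

-- ===== PORT B =====
def get_cheapest_path_alt (paths : List (List Int × Int)) : List Int :=
  match PySem.List.min2? paths (fun x => x.2) (fun x => x.1.length) with
  | some m => m.1
  | none => []               -- min([]) raises ValueError; excluded by Pre_

-- ===== PRECONDITION & SPEC =====
-- Pre_ excludes exactly the empty list, on which A (min of an empty sequence) raises ValueError.
def Pre_get_cheapest_path (paths : List (List Int × Int)) : Prop := paths ≠ []
instance (paths : List (List Int × Int)) : Decidable (Pre_get_cheapest_path paths) := by unfold Pre_get_cheapest_path; infer_instance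
def pvWitness_get_cheapest_path : (List (List Int × Int)) := [([1, 2], 5), ([3], 5)]

def Spec_get_cheapest_path (paths : List (List Int × Int)) (out : List Int) : Prop := out = get_cheapest_path_alt paths
instance (paths : List (List Int × Int)) (out : List Int) : Decidable (Spec_get_cheapest_path paths out) := by unfold Spec_get_cheapest_path; infer_instance

-- ===== CLAIM (what is proved, stated in full; the proofs are below) =====
def Claim_equal_get_cheapest_path : Prop := ∀ (paths : List (List Int × Int)), Dom_get_cheapest_path paths → Pre_get_cheapest_path paths → Spec_get_cheapest_path paths (get_cheapest_path paths)

-- ===== LEMMAS AND PROOFS =====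

-- the strict lexicographic comparison min2? uses for key (cost, length)
def pvLt2 (x m : List Int × Int) : Bool :=
  decide (x.2 < m.2) || (!decide (m.2 < x.2) && decide (x.1.length < m.1.length))

theorem pvLt2_eq_true_iff (x m : List Int × Int) :
    pvLt2 x m = true ↔ (x.2 < m.2 ∨ (x.2 = m.2 ∧ x.1.length < m.1.length)) := by
  simp [pvLt2]; omega

theorem pvLt2_eq_false_iff (x m : List Int × Int) :
    pvLt2 x m = false ↔ (m.2 < x.2 ∨ (m.2 = x.2 ∧ m.1.length ≤ x.1.length)) := by
  simp [pvLt2]; omega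

def pvStep (acc : Option (List Int × Int)) (x : List Int × Int) : Option (List Int × Int) :=
  match acc with
  | none => some x
  | some m => if pvLt2 x m then some x else some m

theorem min2_eq_foldl (ps : List (List Int × Int)) :
    PySem.List.min2? ps (fun x => x.2) (fun x => x.1.length) = ps.foldl pvStep none := by
  unfold PySem.List.min2?
  congr 1
  funext acc x
  cases acc <;> simp [pvStep, pvLt2]

-- invariant of the running-min fold: the result is ≤ everything seen, and if it changed,
-- some index attains it with everything BEFORE that index strictly greater
theorem min2_fold_char (t : List (List Int × Int)) : ∀ m0 : List Int × Int,
    ∃ m, t.foldl pvStep (some m0) = some m ∧ (∀ y ∈ t, pvLt2 y m = false) ∧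
      (m = m0 ∨ (pvLt2 m m0 = true ∧ ∃ i, ∃ hi : i < t.length, t[i] = m ∧
        ∀ j (hj : j < i), pvLt2 m (t[j]'(Nat.lt_trans hj hi)) = true)) := by
  induction t with
  | nil => intro m0; exact ⟨m0, rfl, by simp, Or.inl rfl⟩
  | cons x t ih =>
    intro m0
    by_cases hx : pvLt2 x m0 = true
    · obtain ⟨m, hm, hglob, hdisj⟩ := ih x
      refine ⟨m, by simpa [pvStep, hx] using hm, ?_, ?_⟩
      · intro y hy
        rcases List.mem_cons.mp hy with rfl | hy
        · rcases hdisj with rfl | ⟨hlt, _⟩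
          · rw [pvLt2_eq_false_iff]; rw [pvLt2_eq_true_iff] at hx; omega
          · rw [pvLt2_eq_false_iff]; rw [pvLt2_eq_true_iff] at hx hlt; omega
        · exact hglob y hy
      · rcases hdisj with rfl | ⟨hlt, i, hi, hit, hbefore⟩
        · exact Or.inr ⟨hx, 0, by simp, rfl, fun j hj => absurd hj (Nat.not_lt_zero j)⟩
        · refine Or.inr ⟨?_, i + 1, by simpa using Nat.succ_lt_succ hi, by simpa using hit, ?_⟩
          · rw [pvLt2_eq_true_iff] at hx hlt ⊢; omega
          · intro j hj
            match j, hj with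
            | 0, _ => simpa using hlt
            | j + 1, hj => simpa using hbefore j (Nat.lt_of_succ_lt_succ hj)
    · obtain ⟨m, hm, hglob, hdisj⟩ := ih m0
      have hx' : pvLt2 x m0 = false := by simpa using hx
      refine ⟨m, by simpa [pvStep, hx'] using hm, ?_, ?_⟩
      · intro y hy
        rcases List.mem_cons.mp hy with rfl | hy
        · rcases hdisj with rfl | ⟨hlt, _⟩
          · exact hx'
          · rw [pvLt2_eq_false_iff]; rw [pvLt2_eq_false_iff] at hx'
            rw [pvLt2_eq_true_iff] at hlt; omega
        · exact hglob y hy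
      · rcases hdisj with rfl | ⟨hlt, i, hi, hit, hbefore⟩
        · exact Or.inl rfl
        · refine Or.inr ⟨hlt, i + 1, by simpa using Nat.succ_lt_succ hi, by simpa using hit, ?_⟩
          intro j hj
          match j, hj with
          | 0, _ =>
            simp only [List.getElem_cons_zero]
            rw [pvLt2_eq_true_iff]; rw [pvLt2_eq_false_iff] at hx'
            rw [pvLt2_eq_true_iff] at hlt; omega
          | j + 1, hj => simpa using hbefore j (Nat.lt_of_succ_lt_succ hj)

theorem min2_char (ps : List (List Int × Int)) (h : ps ≠ []) :
    ∃ m, PySem.List.min2? ps (fun x => x.2) (fun x => x.1.length) = some m ∧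
      (∀ y ∈ ps, pvLt2 y m = false) ∧ ∃ i, ∃ hi : i < ps.length, ps[i] = m ∧
        ∀ j (hj : j < i), pvLt2 m (ps[j]'(Nat.lt_trans hj hi)) = true := by
  match ps with
  | [] => exact absurd rfl h
  | x :: t =>
    obtain ⟨m, hm, hglob, hdisj⟩ := min2_fold_char t x
    refine ⟨m, ?_, ?_, ?_⟩
    · rw [min2_eq_foldl]; simpa [pvStep] using hm
    · intro y hy
      rcases List.mem_cons.mp hy with rfl | hy
      · rcases hdisj with rfl | ⟨hlt, _⟩
        · rw [pvLt2_eq_false_iff]; omega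
        · rw [pvLt2_eq_false_iff]; rw [pvLt2_eq_true_iff] at hlt; omega
      · exact hglob y hy
    · rcases hdisj with rfl | ⟨hlt, i, hi, hit, hbefore⟩
      · exact ⟨0, by simp, rfl, fun j hj => absurd hj (Nat.not_lt_zero j)⟩
      · refine ⟨i + 1, by simpa using Nat.succ_lt_succ hi, by simpa using hit, ?_⟩
        intro j hj
        match j, hj with
        | 0, _ => simpa using hlt
        | j + 1, hj => simpa using hbefore j (Nat.lt_of_succ_lt_succ hj)

-- the first element of the cost-filtered, length-filtered pipeline is m.1
theorem head_filter_char : ∀ (ps : List (List Int × Int)) (m : List Int × Int)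
    (i : Nat) (hi : i < ps.length), ps[i] = m →
    (∀ j (hj : j < i), pvLt2 m (ps[j]'(Nat.lt_trans hj hi)) = true) →
    (∀ z ∈ ps, ¬ z.2 < m.2) →
    (((ps.filter (fun x => x.2 == m.2)).map (fun x => x.1)).filter
        (fun l => l.length == m.1.length)).head? = some m.1 := by
  intro ps
  induction ps with
  | nil => intro m i hi; exact absurd hi (by simp)
  | cons x t ih =>
    intro m i hi hit hbefore hnolow
    match i, hi with
    | 0, _ =>
      simp only [List.getElem_cons_zero] at hit
      subst hit
      simp
    | i + 1, hi =>
      have hx : pvLt2 m x = true := by simpa using hbefore 0 (Nat.succ_pos i)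
      have hxnl : ¬ x.2 < m.2 := hnolow x List.mem_cons_self
      rw [pvLt2_eq_true_iff] at hx
      have htail := ih m i (Nat.lt_of_succ_lt_succ hi) (by simpa using hit)
        (fun j hj => by simpa using hbefore (j + 1) (Nat.succ_lt_succ hj))
        (fun z hz => hnolow z (List.mem_cons_of_mem x hz))
      rcases hx with hlt | ⟨heq, hlen⟩
      · have : (x.2 == m.2) = false := by simp; omega
        simpa [List.filter_cons, this] using htail
      · have h1 : (x.2 == m.2) = true := by simp; omega
        have h2 : (x.1.length == m.1.length) = false := by simp; omega
        simpa [List.filter_cons, h1, h2] using htail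

theorem main_eq (paths : List (List Int × Int)) (hne : paths ≠ []) :
    get_cheapest_path paths = get_cheapest_path_alt paths := by
  obtain ⟨m, hm2, hglob, i, hi, hpi, hfirst⟩ := min2_char paths hne
  have hmpaths : m ∈ paths := hpi ▸ List.getElem_mem hi
  have hB : get_cheapest_path_alt paths = m.1 := by
    simp [get_cheapest_path_alt, hm2]
  -- the outer min of A
  have hmapne : paths.map (fun x => x.2) ≠ [] := by simpa using hne
  rcases hlow : PySem.List.min? (paths.map fun x => x.2) (fun v => v) with _ | lowest
  · exact absurd (((PySem.List.min?_eq_none_iff _ _).mp hlow)) hmapne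
  have hlowmem := PySem.List.min?_mem hlow
  have hlowmin := PySem.List.min?_isMin hlow
  have hm2low : m.2 = lowest := by
    obtain ⟨z, hz, hz2⟩ := List.mem_map.mp hlowmem
    have h1 := hglob z hz
    rw [pvLt2_eq_false_iff] at h1
    have h2 := hlowmin m.2 (List.mem_map_of_mem hmpaths)
    simp only at h2
    omega
  have hnolow : ∀ z ∈ paths, ¬ z.2 < m.2 := by
    intro z hz
    have := hlowmin z.2 (List.mem_map_of_mem hz)
    simp only at this
    omega
  -- A's cheapest list and its facts
  have hmfil : m ∈ paths.filter (fun x => x.2 == lowest) := by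
    rw [List.mem_filter]
    exact ⟨hmpaths, by simp [hm2low]⟩
  have hmc : m.1 ∈ (paths.filter (fun x => x.2 == lowest)).map (fun x => x.1) :=
    List.mem_map_of_mem hmfil
  have hcne : ((paths.filter (fun x => x.2 == lowest)).map (fun x => x.1)) ≠ [] :=
    List.ne_nil_of_mem hmc
  rw [hB]
  unfold get_cheapest_path
  rw [hlow]
  simp only []
  rw [if_neg (by simpa [List.length_eq_zero_iff] using hcne)]
  by_cases hlen : 1 < ((paths.filter (fun x => x.2 == lowest)).map (fun x => x.1)).length
  · rw [if_pos hlen]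
    -- the inner min of A
    have hlmapne : (((paths.filter (fun x => x.2 == lowest)).map (fun x => x.1)).map
        (fun x => x.length)) ≠ [] := by simpa using hcne
    rcases hq : PySem.List.min? (((paths.filter (fun x => x.2 == lowest)).map
        (fun x => x.1)).map (fun x => x.length)) (fun v => v) with _ | quickest
    · exact absurd (((PySem.List.min?_eq_none_iff _ _).mp hq)) hlmapne
    have hqmem := PySem.List.min?_mem hq
    have hqmin := PySem.List.min?_isMin hq
    have hqeq : quickest = m.1.length := by
      obtain ⟨c, hc, hclen⟩ := List.mem_map.mp hqmem
      obtain ⟨z, hzf, hz1⟩ := List.mem_map.mp hc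
      have hz2 : z.2 = m.2 := by
        have := (List.mem_filter.mp hzf).2
        simp at this
        omega
      have h1 := hglob z (List.mem_of_mem_filter hzf)
      rw [pvLt2_eq_false_iff] at h1
      have h2 := hqmin m.1.length (List.mem_map_of_mem hmc)
      simp only at h2
      have hzq : z.1.length = quickest := by rw [hz1, hclen]
      rcases h1 with h | ⟨_, h⟩ <;> omega
    rw [hq]
    have := head_filter_char paths m i hi hpi hfirst hnolow
    rw [hm2low] at this
    rw [hqeq]
    simp [this]
  · rw [if_neg hlen]
    have h1 : ((paths.filter (fun x => x.2 == lowest)).map (fun x => x.1)).length = 1 := by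
      have := List.length_pos_of_ne_nil hcne
      omega
    obtain ⟨c, hc⟩ := List.length_eq_one_iff.mp h1
    rw [hc] at hmc ⊢
    simp at hmc
    simp [hmc]

-- ===== VERDICT (by name: the statement is the Claim_ definition above) =====
theorem get_cheapest_path_spec : Claim_equal_get_cheapest_path := by
  intro paths _ hpre
  unfold Spec_get_cheapest_path
  exact main_eq paths hpre
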